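-- pv_equiv track=rewrite | github.com/WOW5678/ReinforcementLearning | PolicyGradient/code_v2/dataProcess_step3.py | build_vocab_label
-- ===== SOURCE A (Python) =====
-- def build_vocab_label(sentences):
--     token2id={}
--     id2token={}
--     for sent in sentences:
--         tokens = sent.split()
--         for token in tokens:
--             if token not in token2id:
--                 token2id[token]=len(token2id)
--
--     for key, value in token2id.items():
--         id2token[value] = key
--     return token2id,id2token
-- ===== SOURCE B (Python) =====
-- def build_vocab_label(sentences):
--     tokens = [t for sent in sentences for t in sent.split()]
--     first = {}
--     for pos, tok in reversed(list(enumerate(tokens))):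
--         first[tok] = pos
--     unique = sorted(first, key=first.get)
--     token2id = {}
--     id2token = {}
--     for i, t in enumerate(unique):
--         token2id[t] = i
--         id2token[i] = t
--     return token2id, id2token
-- ===== Notes on version B (the rewrite author's own statement) =====
-- stated objective: alternative
-- what changed: Instead of A's single forward pass assigning len(dict) ids to unseen tokens plus a reverse loop, B reverse-scans the enumerated token stream to record each token's first-occurrence position in a dict, sorts the distinct tokens by that position, and builds both maps from the sorted list in one enumerate loop.
import Mathlib
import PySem

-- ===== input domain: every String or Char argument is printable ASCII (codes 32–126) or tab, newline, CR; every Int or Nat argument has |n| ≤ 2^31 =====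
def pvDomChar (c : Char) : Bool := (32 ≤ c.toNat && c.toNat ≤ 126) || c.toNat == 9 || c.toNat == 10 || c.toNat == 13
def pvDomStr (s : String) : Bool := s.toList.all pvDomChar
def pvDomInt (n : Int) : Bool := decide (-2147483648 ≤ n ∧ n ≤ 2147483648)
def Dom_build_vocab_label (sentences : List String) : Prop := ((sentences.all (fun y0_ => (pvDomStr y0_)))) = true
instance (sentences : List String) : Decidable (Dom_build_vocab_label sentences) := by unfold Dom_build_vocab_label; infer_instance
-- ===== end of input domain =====

-- B replaces A's incremental len()-based id assignment plus reverse loop by a different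
-- strategy: a reverse scan recording each token's first position, then sorting the
-- distinct tokens by that position (alternative decomposition, same observable result).

-- ===== PORT A =====
def build_vocab_label (sentences : List String) : (List (String × Int)) × (List (Int × String)) :=
  let token2id : PySem.Dict String Int :=
    sentences.foldl (fun d sent =>
      (PySem.Str.split₀ sent).foldl (fun d token =>
        if d.contains token then d else d.insert token (d.size : Int)) d) PySem.Dict.empty
  let id2token : PySem.Dict Int String :=
    token2id.items.foldl (fun d p => d.insert p.2 p.1) PySem.Dict.empty
  (token2id.items, id2token.items)

-- ===== PORT B =====
def build_vocab_label_alt (sentences : List String) : (List (String × Int)) × (List (Int × String)) :=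
  let tokens := sentences.flatMap (fun sent => PySem.Str.split₀ sent)
  let first : PySem.Dict String Int :=
    ((PySem.List.enumerate tokens).reverse).foldl (fun d p => d.insert p.2 p.1) PySem.Dict.empty
  let unique := PySem.List.sorted first.keys (fun t => first.getD t 0) false
  let maps :=
    (PySem.List.enumerate unique).foldl
      (fun (p : PySem.Dict String Int × PySem.Dict Int String) it =>
        (p.1.insert it.2 it.1, p.2.insert it.1 it.2)) (PySem.Dict.empty, PySem.Dict.empty)
  (maps.1.items, maps.2.items)

-- ===== PRECONDITION & SPEC =====
def Spec_build_vocab_label (sentences : List String) (out : (List (String × Int)) × (List (Int × String))) : Prop := out = build_vocab_label_alt sentences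
instance (sentences : List String) (out : (List (String × Int)) × (List (Int × String))) : Decidable (Spec_build_vocab_label sentences out) := by unfold Spec_build_vocab_label; infer_instance

-- ===== CLAIM (what is proved, stated in full; the proofs are below) =====
def Claim_equal_build_vocab_label : Prop := ∀ (sentences : List String), Dom_build_vocab_label sentences → Spec_build_vocab_label sentences (build_vocab_label sentences)

-- ===== LEMMAS AND PROOFS =====

-- folding sentence-by-sentence equals folding over the flattened token list
theorem foldl_split_flatMap {α : Type} (g : α → String → α) (sentences : List String) (init : α) :
    sentences.foldl (fun d sent => (PySem.Str.split₀ sent).foldl g d) init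
      = (sentences.flatMap (fun sent => PySem.Str.split₀ sent)).foldl g init := by
  induction sentences generalizing init with
  | nil => rfl
  | cons s ss ih => simp [List.flatMap_cons, List.foldl_append, ih]

-- the dict built by A's "assign len(d) to each new token" loop, as an enumerate of the ordered dedup
theorem build_loop_eq (toks : List String) :
    toks.foldl (fun d token =>
        if d.contains token then d else d.insert token (d.size : Int)) PySem.Dict.empty
      = PySem.Dict.mk ((PySem.List.enumerate (PySem.Set.ofList toks)).map (fun p => (p.2, p.1))) := by
  induction toks using List.reverseRecOn with
  | nil => rfl
  | append_singleton xs x ih =>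
    rw [List.foldl_append, List.foldl_cons, List.foldl_nil, ih,
        PySem.Set.ofList_append_singleton]
    set u := PySem.Set.ofList xs with hu
    have hkeys : (PySem.Dict.mk ((PySem.List.enumerate u).map (fun p => (p.2, p.1)))).keys = u := by
      show ((PySem.List.enumerate u).map (fun p => (p.2, p.1))).map (·.1) = u
      rw [List.map_map]
      exact PySem.List.map_snd_enumerate u 0
    by_cases hx : x ∈ u
    · have hc : (PySem.Dict.mk ((PySem.List.enumerate u).map (fun p => (p.2, p.1)))).contains x = true := by
        rw [PySem.Dict.contains_iff_mem_keys, hkeys]; exact hx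
      rw [if_pos hc, PySem.Set.add_of_mem hx]
    · have hc : (PySem.Dict.mk ((PySem.List.enumerate u).map (fun p => (p.2, p.1)))).contains x = false := by
        rw [Bool.eq_false_iff]
        intro h
        rw [PySem.Dict.contains_iff_mem_keys, hkeys] at h
        exact hx h
      rw [if_neg (by simp [hc]), PySem.Set.add_of_not_mem hx]
      apply PySem.Dict.ext
      rw [PySem.Dict.items_insert_of_not_contains _ _ hc]
      have hsz : (PySem.Dict.mk ((PySem.List.enumerate u).map (fun p => (p.2, p.1)))).size = u.length := by
        simp [PySem.Dict.size]
      rw [hsz]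
      simp [PySem.List.enumerate_append, PySem.List.enumerate_cons, PySem.List.enumerate_nil]

-- B's reverse scan, structurally: foldl over the reversed enumerate is a foldr over the enumerate
theorem rev_scan_eq_foldr (toks : List String) :
    ((PySem.List.enumerate toks).reverse).foldl (fun d p => d.insert p.2 p.1) PySem.Dict.empty
      = (PySem.List.enumerate toks).foldr (fun p d => d.insert p.2 p.1) PySem.Dict.empty := by
  rw [List.foldl_reverse]

-- the foldr form over 'enumerate xs s' peels structurally
theorem firstDict_cons (x : String) (xs : List String) (s : Int) :
    (PySem.List.enumerate (x :: xs) s).foldr (fun p d => d.insert p.2 p.1) PySem.Dict.empty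
      = ((PySem.List.enumerate xs (s + 1)).foldr (fun p d => d.insert p.2 p.1) PySem.Dict.empty).insert x s := by
  rw [PySem.List.enumerate_cons, List.foldr_cons]

-- membership in the reverse-scan dict's keys
theorem mem_keys_firstDict (xs : List String) (s : Int) (t : String) :
    t ∈ ((PySem.List.enumerate xs s).foldr (fun p d => d.insert p.2 p.1) PySem.Dict.empty).keys ↔ t ∈ xs := by
  induction xs generalizing s with
  | nil => simp [PySem.List.enumerate_nil, PySem.Dict.keys_empty]
  | cons x xs ih =>
    rw [firstDict_cons, PySem.Dict.mem_keys_insert]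
    simp [ih]

theorem nodup_keys_firstDict (xs : List String) (s : Int) :
    ((PySem.List.enumerate xs s).foldr (fun p d => d.insert p.2 p.1) PySem.Dict.empty).keys.Nodup := by
  induction xs generalizing s with
  | nil => simp [PySem.List.enumerate_nil, PySem.Dict.keys_empty]
  | cons x xs ih => rw [firstDict_cons]; exact PySem.Dict.nodup_keys_insert _ _ _ (ih (s + 1))

-- the value stored for a present token is its first-occurrence index (offset by s)
theorem getD_firstDict (xs : List String) (s : Int) (t : String) (ht : t ∈ xs) :
    ((PySem.List.enumerate xs s).foldr (fun p d => d.insert p.2 p.1) PySem.Dict.empty).getD t 0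
      = s + (xs.idxOf t : Int) := by
  induction xs generalizing s with
  | nil => cases ht
  | cons x xs ih =>
    rw [firstDict_cons, PySem.Dict.getD_insert]
    by_cases hx : t = x
    · subst hx; simp [List.idxOf_cons_self]
    · rw [if_neg hx]
      rcases List.mem_cons.mp ht with h | h
      · exact absurd h hx
      · rw [ih (s + 1) h, List.idxOf_cons_ne _ (by exact fun e => hx e.symm)]
        push_cast
        ring

-- first-occurrence indices are strictly increasing along the ordered dedup
theorem pairwise_idxOf_ofList (xs : List String) :
    (PySem.Set.ofList xs).Pairwise (fun a b => (xs.idxOf a : Int) < (xs.idxOf b : Int)) := by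
  induction xs with
  | nil => simp [PySem.Set.ofList_nil]
  | cons x xs ih =>
    rw [PySem.Set.ofList_cons]
    have hdis : ∀ b ∈ (PySem.Set.ofList xs).discard x, b ∈ xs ∧ b ≠ x := by
      intro b hb
      obtain ⟨h1, h2⟩ := (PySem.Set.mem_discard _ _ _).mp hb
      exact ⟨(PySem.Set.mem_ofList _ _).mp h1, h2⟩
    constructor
    · intro b hb
      obtain ⟨hbm, hbx⟩ := hdis b hb
      rw [List.idxOf_cons_self, List.idxOf_cons_ne _ (fun e => hbx e.symm)]
      positivity
    · have hfil : PySem.Set.discard (PySem.Set.ofList xs) x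
          = (PySem.Set.ofList xs).filter (fun y => !(y == x)) := by
        unfold PySem.Set.discard; rfl
      have h1 : ((PySem.Set.ofList xs).discard x).Pairwise
          (fun a b => (xs.idxOf a : Int) < (xs.idxOf b : Int)) := by
        rw [hfil]; exact ih.filter _
      refine h1.imp_of_mem ?_
      intro a b ha hb hab
      obtain ⟨ham, hax⟩ := hdis a ha
      obtain ⟨hbm, hbx⟩ := hdis b hb
      rw [List.idxOf_cons_ne _ (fun e => hax e.symm), List.idxOf_cons_ne _ (fun e => hbx e.symm)]
      push_cast
      omega

-- the product fold building both output dicts is the pair of the two separate folds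
theorem maps_fold_eq (u : List String) :
    (PySem.List.enumerate u).foldl
      (fun (p : PySem.Dict String Int × PySem.Dict Int String) it =>
        (p.1.insert it.2 it.1, p.2.insert it.1 it.2)) (PySem.Dict.empty, PySem.Dict.empty)
    = ((PySem.List.enumerate u).foldl (fun d it => d.insert it.2 it.1) PySem.Dict.empty,
       (PySem.List.enumerate u).foldl (fun d it => d.insert it.1 it.2) PySem.Dict.empty) :=
  PySem.List.foldl_prod_mk
    (fun (d : PySem.Dict String Int) (it : Int × String) => d.insert it.2 it.1)
    (fun (d : PySem.Dict Int String) (it : Int × String) => d.insert it.1 it.2) _ _ _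

-- ===== VERDICT (by name: the statement is the Claim_ definition above) =====
theorem build_vocab_label_spec : Claim_equal_build_vocab_label := by
  intro sentences _
  unfold Spec_build_vocab_label build_vocab_label build_vocab_label_alt
  dsimp only
  rw [foldl_split_flatMap, build_loop_eq, rev_scan_eq_foldr, maps_fold_eq]
  set toks := sentences.flatMap (fun sent => PySem.Str.split₀ sent) with htoks
  set F := (PySem.List.enumerate toks).foldr (fun p d => d.insert p.2 p.1) PySem.Dict.empty with hF
  set u := PySem.Set.ofList toks with hu
  have hun : u.Nodup := PySem.Set.nodup_ofList toks
  have huniq : PySem.List.sorted F.keys (fun t => F.getD t 0) false = u := by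
    apply PySem.List.sorted_eq_of_perm_of_pairwise_lt
    · refine (List.perm_ext_iff_of_nodup hun (nodup_keys_firstDict toks 0)).mpr ?_
      intro a
      rw [mem_keys_firstDict, hu, PySem.Set.mem_ofList]
    · refine (pairwise_idxOf_ofList toks).imp_of_mem ?_
      intro a b ha hb hab
      rw [hF, getD_firstDict toks 0 a ((PySem.Set.mem_ofList _ _).mp ha),
          getD_firstDict toks 0 b ((PySem.Set.mem_ofList _ _).mp hb)]
      simpa using hab
  rw [huniq]
  refine Prod.ext ?_ ?_
  · -- token2id items on both sides
    show ((PySem.List.enumerate u).map (fun p => (p.2, p.1)))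
        = ((PySem.List.enumerate u).foldl (fun d it => d.insert it.2 it.1) PySem.Dict.empty).items
    have hnd : ((PySem.List.enumerate u).map (·.2)).Nodup := by
      rw [PySem.List.map_snd_enumerate]; exact hun
    have := PySem.Dict.items_foldl_insert_fresh (l := PySem.List.enumerate u)
        (k := (·.2)) (v := (·.1)) (d := PySem.Dict.empty) (by intro a _; simp) hnd
    simpa using this.symm
  · -- id2token: A folds over token2id.items, B over the enumerate; the same fold
    show (((PySem.List.enumerate u).map (fun p => (p.2, p.1))).foldl
            (fun d p => d.insert p.2 p.1) PySem.Dict.empty).items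
        = ((PySem.List.enumerate u).foldl (fun d it => d.insert it.1 it.2) PySem.Dict.empty).items
    rw [List.foldl_map]
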